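-- pv_equiv track=rewrite | github.com/lethehoa/mongo-postgres-extractor | utils.py | create_value_field
-- ===== SOURCE A (Python) =====
-- def create_value_field(number_of_columns): # this fuction return one part of the query
--     value = ""
--     for i in range(number_of_columns):
--         if i == 0:
--             value += "(%s,"
--         if i == number_of_columns - 1:
--             value += "%s)"
--         else:
--             value += "%s,"
--     return value
-- ===== SOURCE B (Python) =====
-- def create_value_field(number_of_columns):
--     s = "%s," * number_of_columns
--     if number_of_columns < 1:
--         return ""
--     return "(" + s + "%s)"
-- ===== Notes on version B (the rewrite author's own statement) =====
-- stated objective: simpler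
-- what changed: Replaces the indexed loop with per-iteration branch logic by a closed form: '%s,' repeated n times wrapped in '(' ... '%s)' (preserving A's n+1-placeholder count), empty string for n < 1.
import Mathlib
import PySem

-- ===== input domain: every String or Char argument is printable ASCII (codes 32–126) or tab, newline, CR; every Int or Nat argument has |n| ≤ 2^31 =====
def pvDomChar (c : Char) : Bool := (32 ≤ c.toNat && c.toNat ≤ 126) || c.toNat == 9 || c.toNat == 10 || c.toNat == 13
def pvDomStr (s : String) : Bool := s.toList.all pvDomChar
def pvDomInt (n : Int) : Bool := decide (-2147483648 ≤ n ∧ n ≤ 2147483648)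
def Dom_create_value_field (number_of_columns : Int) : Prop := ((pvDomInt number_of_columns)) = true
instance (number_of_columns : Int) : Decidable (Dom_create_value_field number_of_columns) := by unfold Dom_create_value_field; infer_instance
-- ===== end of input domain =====

-- B replaces A's indexed loop with per-iteration branching by a closed form
-- ('%s,' repeated n times wrapped as '(…%s)', '' for n < 1); objective: simpler.

-- ===== PORT A =====
-- loop body of A: the two `if`s in order, acting on the accumulated string
def stepA (n : Int) (value : String) (i : Int) : String :=
  let value := if i == 0 then value ++ "(%s," else value
  if i == n - 1 then value ++ "%s)" else value ++ "%s,"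

def create_value_field (number_of_columns : Int) : String :=
  (PySem.List.pyRange 0 number_of_columns 1).foldl (stepA number_of_columns) ""

-- ===== PORT B =====
-- '"%s," * n' is String.join (List.replicate n.toNat "%s,") (empty for n ≤ 0, as in Python)
def create_value_field_alt (number_of_columns : Int) : String :=
  let s := String.join (List.replicate number_of_columns.toNat "%s,")
  if number_of_columns < 1 then "" else "(" ++ s ++ "%s)"

-- ===== PRECONDITION & SPEC =====
def Spec_create_value_field (number_of_columns : Int) (out : String) : Prop := out = create_value_field_alt number_of_columns
instance (number_of_columns : Int) (out : String) : Decidable (Spec_create_value_field number_of_columns out) := by unfold Spec_create_value_field; infer_instance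

-- ===== CLAIM (what is proved, stated in full; the proofs are below) =====
def Claim_equal_create_value_field : Prop := ∀ (number_of_columns : Int), Dom_create_value_field number_of_columns → Spec_create_value_field number_of_columns (create_value_field number_of_columns)

-- ===== LEMMAS AND PROOFS =====
lemma join_snoc (a : String) (l : List String) : String.join (l ++ [a]) = String.join l ++ a := by
  simp [String.join_eq]

lemma join_cons (a : String) (l : List String) : String.join (a :: l) = a ++ String.join l := by
  simp [String.join_eq]

-- value of A's loop after the first m iterations, provided iteration m is not the last one
lemma tailA (n : Int) (m : Nat) (h1 : 1 ≤ m) (h2 : (m : Int) ≤ n - 1) :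
    ((List.range m).map (fun k : Nat => (k : Int))).foldl (stepA n) "" =
      "(%s," ++ String.join (List.replicate m "%s,") := by
  induction m with
  | zero => omega
  | succ m ih =>
    rw [List.range_succ, List.map_append, List.foldl_append]
    by_cases hm : m = 0
    · subst hm
      have hne : ¬ ((0 : Int) = n - 1) := by push_cast at h2; omega
      simp [stepA, hne]
      decide
    · have hne0 : ¬ ((m : Int) = 0) := by omega
      have hne : ¬ ((m : Int) = n - 1) := by push_cast at h2 ⊢; omega
      rw [ih (by omega) (by push_cast at h2 ⊢; omega)]
      simp only [List.map_cons, List.map_nil, List.foldl_cons, List.foldl_nil, stepA,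
        beq_iff_eq, if_neg hne0, if_neg hne, List.replicate_succ', join_snoc]
      rw [String.append_assoc]

lemma create_value_field_eq_alt (n : Int) : create_value_field n = create_value_field_alt n := by
  unfold create_value_field create_value_field_alt
  by_cases hlt : n < 1
  · rw [PySem.List.pyRange_one_eq_nil (by omega), if_pos hlt]; rfl
  · rw [if_neg hlt, PySem.List.pyRange_one]
    have hz : (n - 0).toNat = n.toNat := by omega
    rw [hz]
    have hmap : (List.range n.toNat).map (fun k : Nat => (0 : Int) + k)
        = (List.range n.toNat).map (fun k : Nat => (k : Int)) := by
      simp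
    rw [hmap]
    by_cases h1 : n = 1
    · subst h1; decide
    · obtain ⟨m, hm⟩ : ∃ m, n.toNat = m + 1 := ⟨n.toNat - 1, by omega⟩
      have hm1 : 1 ≤ m := by omega
      have hmn : (m : Int) = n - 1 := by omega
      rw [hm, List.range_succ, List.map_append, List.foldl_append,
        tailA n m hm1 (by omega)]
      simp only [List.map_cons, List.map_nil, List.foldl_cons, List.foldl_nil, stepA,
        beq_iff_eq, if_neg (show ¬ ((m:Int) = 0) by omega), if_pos hmn,
        List.replicate_succ, join_cons]
      have h4 : ("(" : String) ++ "%s," = "(%s," := by decide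
      rw [← String.append_assoc, h4]

-- ===== VERDICT (by name: the statement is the Claim_ definition above) =====
theorem create_value_field_spec : Claim_equal_create_value_field := by
  intro n _
  exact create_value_field_eq_alt n
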